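-- pv_equiv track=rewrite | github.com/cmackethan/AdventOfCode2015 | day8/part1.py | calculate
-- ===== SOURCE A (Python) =====
-- def calculate(s: str) -> (int, int):
--     im_line: int = len(s) - 2
--     i: int = 0
--     while i < len(s):
--         if s[i] == '\\':
--             if s[i + 1] == 'x': # Never OOB
--                 im_line -= 3
--             else:
--                 im_line -= 1
--             i += 1
--         i += 1
--     return (len(s), im_line)
-- ===== SOURCE B (Python) =====
-- def calculate(s: str) -> (int, int):
--     t = s.replace('\\\\', '.')
--     return (len(s), len(t) - 2 - t.count('\\') - 2 * t.count('\\x'))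
-- ===== Notes on version B (the rewrite author's own statement) =====
-- stated objective: simpler
-- what changed: Replaces A's index-based scan with manual skip logic by collapsing every backslash pair with str.replace and then counting the remaining generic and \x escapes with str.count, turning the stateful loop into a three-line counting formula over C-implemented string primitives.
-- outside the precondition, e.g. on calculate('\\'): A raises IndexError, B returns (1, -2)
import Mathlib
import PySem

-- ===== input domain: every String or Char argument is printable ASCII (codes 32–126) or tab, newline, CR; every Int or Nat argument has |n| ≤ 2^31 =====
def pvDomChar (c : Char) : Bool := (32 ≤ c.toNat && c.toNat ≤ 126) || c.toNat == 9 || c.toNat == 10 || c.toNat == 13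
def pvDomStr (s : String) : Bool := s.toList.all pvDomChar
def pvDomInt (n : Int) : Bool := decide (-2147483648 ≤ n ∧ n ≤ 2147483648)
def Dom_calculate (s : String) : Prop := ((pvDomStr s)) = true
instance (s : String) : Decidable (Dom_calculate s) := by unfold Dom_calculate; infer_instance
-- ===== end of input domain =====

-- B replaces A's index/skip scan by collapsing '\\' pairs with str.replace and counting the
-- remaining escapes with str.count (objective: simpler).

-- ===== PORT A =====
-- while-loop of A: index i, decrement accumulator; on '\' looks at s[i+1].
-- When i is the last index and s[i] = '\', Python A raises IndexError (excluded by Pre_);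
-- the port returns acc - 1 there.
def calcLoopA (cs : List Char) (i : Nat) (acc : Int) : Int :=
  if h : i < cs.length then
    if cs[i] = '\\' then
      match cs[i+1]? with
      | some c => calcLoopA cs (i + 2) (if c = 'x' then acc - 3 else acc - 1)
      | none => acc - 1
    else calcLoopA cs (i + 1) acc
  else acc
termination_by cs.length - i

def calculate (s : String) : Int × Int :=
  ((PySem.Str.len s : Int), calcLoopA s.toList 0 ((PySem.Str.len s : Int) - 2))

-- ===== PORT B =====
def calculate_alt (s : String) : Int × Int :=
  let t := PySem.Str.replace s "\\\\" "."
  ((PySem.Str.len s : Int),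
   (PySem.Str.len t : Int) - 2 - (PySem.Str.count t "\\" : Int)
     - 2 * (PySem.Str.count t "\\x" : Int))

-- ===== PRECONDITION & SPEC =====
-- Pre_ excludes exactly the strings ending in an odd-length run of backslashes, on which
-- Python A raises IndexError (s[i+1] out of range on the trailing lone backslash).
def Pre_calculate (s : String) : Prop :=
  (s.toList.reverse.takeWhile (· = '\\')).length % 2 = 0
instance (s : String) : Decidable (Pre_calculate s) := by unfold Pre_calculate; infer_instance

def pvWitness_calculate : String := "a\\xb"

def Spec_calculate (s : String) (out : Int × Int) : Prop := out = calculate_alt s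
instance (s : String) (out : Int × Int) : Decidable (Spec_calculate s out) := by unfold Spec_calculate; infer_instance

-- ===== CLAIM (what is proved, stated in full; the proofs are below) =====
def Claim_equal_calculate : Prop := ∀ (s : String), Dom_calculate s → Pre_calculate s → Spec_calculate s (calculate s)

-- ===== LEMMAS AND PROOFS =====

-- token cost of A's scan on the suffix it still has to process
def tokA : List Char → Int
  | [] => 0
  | ['\\'] => 1
  | '\\' :: c :: r => (if c = 'x' then 3 else 1) + tokA r
  | _ :: r => tokA r

-- structural form of s.replace('\\\\', '.')
def rep2 : List Char → List Char
  | [] => []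
  | '\\' :: '\\' :: r => '.' :: rep2 r
  | c :: r => c :: rep2 r

-- structural form of t.count('\\x') (non-overlapping, as Python counts)
def cntX : List Char → Nat
  | [] => 0
  | '\\' :: 'x' :: r => 1 + cntX r
  | _ :: r => cntX r

theorem rep2_cons_ne (c : Char) (t : List Char) (h : c ≠ '\\') : rep2 (c :: t) = c :: rep2 t := by
  rw [rep2.eq_def]
  split
  · simp_all
  · simp_all
  · rename_i heq
    injection heq with h1 h2
    subst h1; subst h2; rfl

theorem rep2_bs_cons_ne (d : Char) (t : List Char) (h : d ≠ '\\') :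
    rep2 ('\\' :: d :: t) = '\\' :: rep2 (d :: t) := by
  rw [rep2.eq_def]
  split
  · simp_all
  · simp_all
  · rename_i heq
    injection heq with h1 h2
    subst h2; rw [← h1]

theorem rep2_single (c : Char) : rep2 [c] = [c] := by
  rw [rep2.eq_def]
  split
  · simp_all
  · simp_all
  · rename_i heq
    injection heq with h1 h2
    subst h1; subst h2; rfl

theorem cntX_cons_ne (c : Char) (t : List Char) (h : c ≠ '\\') : cntX (c :: t) = cntX t := by
  rw [cntX.eq_def]
  split
  · simp_all
  · simp_all
  · rename_i heq
    injection heq with h1 h2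
    subst h1; subst h2; rfl

theorem cntX_bs_cons_ne (d : Char) (t : List Char) (h : d ≠ 'x') :
    cntX ('\\' :: d :: t) = cntX (d :: t) := by
  rw [cntX.eq_def]
  split
  · simp_all
  · simp_all
  · rename_i heq
    injection heq with h1 h2
    subst h2; rfl

theorem cntX_single (c : Char) : cntX [c] = 0 := by
  rw [cntX.eq_def]
  split
  · simp_all
  · simp_all
  · rename_i heq
    injection heq with h1 h2
    subst h1; subst h2; rfl

theorem tokA_cons_ne (c : Char) (r : List Char) (h : c ≠ '\\') : tokA (c :: r) = tokA r := by
  rw [tokA.eq_def]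
  split
  · simp_all
  · simp_all
  · simp_all
  · rename_i heq
    injection heq with h1 h2
    subst h1; subst h2; rfl

theorem calcLoopA_eq_tokA (cs : List Char) (i : Nat) (acc : Int) :
    calcLoopA cs i acc = acc - tokA (cs.drop i) := by
  induction i, acc using calcLoopA.induct cs with
  | case1 i acc h hbs c hx ih =>
      rw [calcLoopA, dif_pos h, if_pos hbs, hx]
      have h1 : i + 1 < cs.length := by
        by_contra hcon
        simp [List.getElem?_eq_none (by omega : cs.length ≤ i + 1)] at hx
      have hd : cs.drop i = cs[i] :: cs[i+1] :: cs.drop (i+2) := by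
        rw [List.drop_eq_getElem_cons h, List.drop_eq_getElem_cons h1]
      have hc : cs[i+1] = c := by
        rw [List.getElem?_eq_getElem h1] at hx; exact (Option.some.inj hx)
      rw [hd, hbs, hc, tokA]
      by_cases hcx : c = 'x' <;> simp only [hcx, if_true, if_false] <;>
        simp [hcx] at ih <;> rw [ih] <;> ring
  | case2 i acc h hbs hx =>
      rw [calcLoopA, dif_pos h, if_pos hbs, hx]
      have h1 : cs.length ≤ i + 1 := by
        by_contra hcon
        rw [List.getElem?_eq_getElem (by omega)] at hx
        simp at hx
      have hd : cs.drop i = [cs[i]] := by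
        rw [List.drop_eq_getElem_cons h]
        congr 1
        exact List.drop_eq_nil_of_le h1
      rw [hd, hbs, tokA]
  | case3 i acc h hbs ih =>
      rw [calcLoopA, dif_pos h, if_neg hbs]
      have hd : cs.drop i = cs[i] :: cs.drop (i+1) := List.drop_eq_getElem_cons h
      rw [ih, hd, tokA_cons_ne _ _ hbs]
  | case4 i acc h =>
      rw [calcLoopA, dif_neg h]
      rw [List.drop_eq_nil_of_le (by omega), tokA]
      ring

theorem replace_go_eq (fuel : Nat) (l acc : List Char) (hf : l.length ≤ fuel) :
    PySem.Chars.replace.go ['\\', '\\'] ['.'] fuel l acc = acc.reverse ++ rep2 l := by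
  induction fuel generalizing l acc with
  | zero =>
      have : l = [] := List.eq_nil_of_length_eq_zero (by omega)
      subst this
      simp [PySem.Chars.replace.go, rep2]
  | succ n ih =>
      cases l with
      | nil => simp [PySem.Chars.replace.go, rep2]
      | cons c t =>
          rw [PySem.Chars.replace.go]
          by_cases hc : c = '\\'
          · subst hc
            cases t with
            | nil =>
                have hp : List.isPrefixOf ['\\', '\\'] ['\\'] = false := by decide
                rw [hp]
                simp only [Bool.false_eq_true, if_false]
                rw [ih _ _ (by simp)]
                simp [rep2_single, rep2]
            | cons d t' =>
                by_cases hd : d = '\\'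
                · subst hd
                  have hp : List.isPrefixOf ['\\', '\\'] ('\\' :: '\\' :: t') = true := by
                    simp [List.isPrefixOf]
                  rw [hp]
                  simp only [if_true]
                  rw [show List.drop (List.length (['\\', '\\'] : List Char)) ('\\' :: '\\' :: t') = t' from rfl]
                  rw [ih _ _ (by simp at hf ⊢; omega)]
                  simp [rep2]
                · have hp : List.isPrefixOf ['\\', '\\'] ('\\' :: d :: t') = false := by
                    simp [List.isPrefixOf]; exact fun h => hd h.symm
                  rw [hp]
                  simp only [Bool.false_eq_true, if_false]
                  rw [ih _ _ (by simp at hf ⊢; omega)]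
                  rw [rep2_bs_cons_ne _ _ hd]
                  simp
          · have hp : List.isPrefixOf ['\\', '\\'] (c :: t) = false := by
              simp [List.isPrefixOf]; exact fun h => absurd h.symm hc
            rw [hp]
            simp only [Bool.false_eq_true, if_false]
            rw [ih _ _ (by simp at hf ⊢; omega)]
            rw [rep2_cons_ne _ _ hc]
            simp

theorem replace_eq_rep2 (cs : List Char) :
    PySem.Chars.replace cs ['\\', '\\'] ['.'] = rep2 cs := by
  rw [PySem.Chars.replace]
  simp only [List.isEmpty_cons, Bool.false_eq_true, if_false]
  simpa using replace_go_eq cs.length cs [] (le_refl _)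

theorem count_go_bs_eq (fuel : Nat) (l : List Char) (acc : Nat) (hf : l.length ≤ fuel) :
    PySem.Chars.count.go ['\\'] fuel l acc = acc + l.count '\\' := by
  induction fuel generalizing l acc with
  | zero =>
      have : l = [] := List.eq_nil_of_length_eq_zero (by omega)
      subst this
      simp [PySem.Chars.count.go]
  | succ n ih =>
      cases l with
      | nil => simp [PySem.Chars.count.go]
      | cons c t =>
          rw [PySem.Chars.count.go]
          by_cases hc : c = '\\'
          · subst hc
            have hp : List.isPrefixOf ['\\'] ('\\' :: t) = true := by simp [List.isPrefixOf]
            rw [hp]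
            simp only [if_true]
            rw [show List.drop (List.length (['\\'] : List Char)) ('\\' :: t) = t from rfl]
            rw [ih _ _ (by simp at hf ⊢; omega)]
            simp
            omega
          · have hp : List.isPrefixOf ['\\'] (c :: t) = false := by
              simp [List.isPrefixOf]; exact fun h => hc h.symm
            rw [hp]
            simp only [Bool.false_eq_true, if_false]
            rw [ih _ _ (by simp at hf ⊢; omega)]
            simp [hc]

theorem count_go_bsx_eq (fuel : Nat) (l : List Char) (acc : Nat) (hf : l.length ≤ fuel) :
    PySem.Chars.count.go ['\\', 'x'] fuel l acc = acc + cntX l := by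
  induction fuel generalizing l acc with
  | zero =>
      have : l = [] := List.eq_nil_of_length_eq_zero (by omega)
      subst this
      simp [PySem.Chars.count.go, cntX]
  | succ n ih =>
      cases l with
      | nil => simp [PySem.Chars.count.go, cntX]
      | cons c t =>
          rw [PySem.Chars.count.go]
          by_cases hc : c = '\\'
          · subst hc
            cases t with
            | nil =>
                have hp : List.isPrefixOf ['\\', 'x'] ['\\'] = false := by decide
                rw [hp]
                simp only [Bool.false_eq_true, if_false]
                rw [ih _ _ (by simp)]
                simp [cntX_single, cntX]
            | cons d t' =>
                by_cases hd : d = 'x'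
                · subst hd
                  have hp : List.isPrefixOf ['\\', 'x'] ('\\' :: 'x' :: t') = true := by
                    simp [List.isPrefixOf]
                  rw [hp]
                  simp only [if_true]
                  rw [show List.drop (List.length (['\\', 'x'] : List Char)) ('\\' :: 'x' :: t') = t' from rfl]
                  rw [ih _ _ (by simp at hf ⊢; omega)]
                  simp [cntX]
                  omega
                · have hp : List.isPrefixOf ['\\', 'x'] ('\\' :: d :: t') = false := by
                    simp [List.isPrefixOf]; exact fun h => hd h.symm
                  rw [hp]
                  simp only [Bool.false_eq_true, if_false]
                  rw [ih _ _ (by simp at hf ⊢; omega)]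
                  rw [cntX_bs_cons_ne _ _ hd]
          · have hp : List.isPrefixOf ['\\', 'x'] (c :: t) = false := by
              simp [List.isPrefixOf]; exact fun h => absurd h.symm hc
            rw [hp]
            simp only [Bool.false_eq_true, if_false]
            rw [ih _ _ (by simp at hf ⊢; omega)]
            rw [cntX_cons_ne _ _ hc]

theorem count_bs_eq (cs : List Char) :
    PySem.Chars.count cs ['\\'] = cs.count '\\' := by
  rw [PySem.Chars.count]
  simp only [List.isEmpty_cons, Bool.false_eq_true, if_false]
  simpa using count_go_bs_eq cs.length cs 0 (le_refl _)

theorem count_bsx_eq (cs : List Char) :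
    PySem.Chars.count cs ['\\', 'x'] = cntX cs := by
  rw [PySem.Chars.count]
  simp only [List.isEmpty_cons, Bool.false_eq_true, if_false]
  simpa using count_go_bsx_eq cs.length cs 0 (le_refl _)

-- the central identity: B's count formula on rep2 cs equals A's token cost
theorem main_identity (cs : List Char) :
    ((rep2 cs).length : Int) - ((rep2 cs).count '\\' : Int) - 2 * (cntX (rep2 cs) : Int)
      = (cs.length : Int) - tokA cs := by
  induction cs using tokA.induct with
  | case1 => simp [rep2, tokA, cntX]
  | case2 =>
      rw [rep2_single, cntX_single, tokA]
      simp
  | case3 c r ih =>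
      by_cases hc : c = '\\'
      · subst hc
        rw [show rep2 ('\\' :: '\\' :: r) = '.' :: rep2 r from rfl,
            cntX_cons_ne _ _ (by decide), tokA]
        simp only [List.length_cons, List.count_cons]
        simp
        push_cast at ih ⊢
        omega
      · rw [rep2_bs_cons_ne _ _ hc, rep2_cons_ne _ _ hc, tokA]
        by_cases hcx : c = 'x'
        · subst hcx
          rw [show cntX ('\\' :: 'x' :: rep2 r) = 1 + cntX (rep2 r) from rfl]
          simp
          push_cast at ih ⊢
          omega
        · rw [cntX_bs_cons_ne _ _ hcx, cntX_cons_ne _ _ hc]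
          simp [hc, hcx]
          push_cast at ih ⊢
          omega
  | case4 c r hne1 hne2 ih =>
      have hc : c ≠ '\\' := by
        intro h
        cases r with
        | nil => exact hne1 h rfl
        | cons d r' => exact hne2 d r' h rfl
      rw [rep2_cons_ne _ _ hc, cntX_cons_ne _ _ hc, tokA_cons_ne _ _ hc]
      simp [hc]
      push_cast at ih ⊢
      omega

theorem calculate_eq_alt (s : String) : calculate s = calculate_alt s := by
  unfold calculate calculate_alt
  have hr : (PySem.Str.replace s "\\\\" ".").toList = rep2 s.toList := by
    rw [PySem.Str.toList_replace]
    exact replace_eq_rep2 s.toList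
  simp only [PySem.Str.len_eq, PySem.Str.count_eq, hr]
  rw [show ("\\" : String).toList = ['\\'] from rfl,
      show ("\\x" : String).toList = ['\\', 'x'] from rfl,
      count_bs_eq, count_bsx_eq]
  have hm := main_identity s.toList
  have hl := calcLoopA_eq_tokA s.toList 0 ((s.toList.length : Int) - 2)
  simp only [List.drop_zero] at hl
  rw [hl]
  refine Prod.ext rfl ?_
  simp only
  omega

-- ===== VERDICT (by name: the statement is the Claim_ definition above) =====
theorem calculate_spec : Claim_equal_calculate := by
  intro s _ _
  unfold Spec_calculate
  exact calculate_eq_alt s
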